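-- pv_equiv track=rewrite | github.com/ciozhang/Bioinformatics | Finding_Hidden_Messages_in_DNA(Bioinformatics_I)/Week_1_Welcome/functions.py | NumberToPattern
-- ===== SOURCE A (Python) =====
-- def NumberToSymbol(index):
--     index = int(index)
--     if index == 0:
--         return 'A'
--     elif index == 1:
--         return 'C'
--     elif index == 2:
--         return 'G'
--     elif index == 3:
--         return 'T'
--
-- def NumberToPattern(index, k):
--     index = int(index)
--     k = int(k)
--     if k == 1:
--         return NumberToSymbol(index)
--     else:
--         prefixIndex = index//4
--         r = index%4
--         symbol = NumberToSymbol(r)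
--         return NumberToPattern(prefixIndex,k-1)+symbol
-- ===== SOURCE B (Python) =====
-- def NumberToSymbol(index):
--     index = int(index)
--     if index == 0:
--         return 'A'
--     elif index == 1:
--         return 'C'
--     elif index == 2:
--         return 'G'
--     elif index == 3:
--         return 'T'
--
-- def NumberToPattern(index, k):
--     index = int(index)
--     k = int(k)
--     if k == 1:
--         return NumberToSymbol(index)
--     symbols = []
--     for _ in range(k - 1):
--         symbols.append(NumberToSymbol(index % 4))
--         index //= 4
--     symbols.append(NumberToSymbol(index))
--     return ''.join(reversed(symbols))
-- ===== Notes on version B (the rewrite author's own statement) =====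
-- stated objective: alternative
-- what changed: Replaces the recursion over k with an explicit loop that extracts base-4 digits least-significant first into a list and joins them reversed.
-- outside the precondition, e.g. on NumberToPattern(5, 1): A returns None, B returns None; on NumberToPattern(-1, 2): A raises TypeError, B raises TypeError; on NumberToPattern(16, 2): A raises TypeError, B raises TypeError
import Mathlib
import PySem

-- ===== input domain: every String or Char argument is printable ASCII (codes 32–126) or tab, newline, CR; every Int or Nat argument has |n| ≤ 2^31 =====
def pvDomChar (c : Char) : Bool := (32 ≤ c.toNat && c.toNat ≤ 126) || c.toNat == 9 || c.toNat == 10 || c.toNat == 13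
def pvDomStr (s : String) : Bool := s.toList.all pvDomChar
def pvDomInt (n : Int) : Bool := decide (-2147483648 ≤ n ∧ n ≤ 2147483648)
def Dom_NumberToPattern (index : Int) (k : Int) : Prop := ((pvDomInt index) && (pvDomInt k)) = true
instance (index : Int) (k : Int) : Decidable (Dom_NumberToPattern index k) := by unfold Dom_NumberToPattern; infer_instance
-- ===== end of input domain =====

-- B replaces the recursion over k by an explicit loop extracting base-4 digits into a list joined in reverse (alternative decomposition, same cost class).

-- ===== PORT A =====
-- NumberToSymbol returns None for index outside 0..3 (a non-string); ported as "" — such inputs lie outside Pre_.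
-- Shared by both ports, as both Pythons call the same-module helper NumberToSymbol.
def numberToSymbol (index : Int) : String :=
  if index = 0 then "A"
  else if index = 1 then "C"
  else if index = 2 then "G"
  else if index = 3 then "T"
  else ""

def NumberToPattern (index : Int) (k : Int) : String :=
  if k = 1 then numberToSymbol index
  else if k < 1 then ""  -- Python recurses forever here (RecursionError); totality guard, outside Pre_
  else NumberToPattern (PySem.Int.floordiv index 4) (k - 1) ++ numberToSymbol (PySem.Int.mod index 4)
termination_by k.toNat
decreasing_by omega

-- ===== PORT B =====
def NumberToPattern_alt (index : Int) (k : Int) : String :=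
  if k = 1 then numberToSymbol index
  else
    let st := (PySem.List.pyRange 0 (k - 1) 1).foldl
      (fun (st : List String × Int) _ =>
        (st.1 ++ [numberToSymbol (PySem.Int.mod st.2 4)], PySem.Int.floordiv st.2 4))
      ([], index)
    PySem.Str.join "" (st.1 ++ [numberToSymbol st.2]).reverse

-- ===== PRECONDITION & SPEC =====
-- Pre_ excludes k < 1 (Python A never terminates) and index outside [0, 4^k) (A returns None at k == 1, or raises TypeError adding None to a string).
def Pre_NumberToPattern (index : Int) (k : Int) : Prop :=
  1 ≤ k ∧ 0 ≤ index ∧ index < 4 ^ k.toNat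
instance (index : Int) (k : Int) : Decidable (Pre_NumberToPattern index k) := by
  unfold Pre_NumberToPattern; infer_instance

def pvWitness_NumberToPattern : Int × Int := (7, 2)

def Spec_NumberToPattern (index : Int) (k : Int) (out : String) : Prop := out = NumberToPattern_alt index k
instance (index : Int) (k : Int) (out : String) : Decidable (Spec_NumberToPattern index k out) := by unfold Spec_NumberToPattern; infer_instance

-- ===== CLAIM (what is proved, stated in full; the proofs are below) =====
def Claim_equal_NumberToPattern : Prop := ∀ (index : Int) (k : Int), Dom_NumberToPattern index k → Pre_NumberToPattern index k → Spec_NumberToPattern index k (NumberToPattern index k)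

-- ===== LEMMAS AND PROOFS =====

-- digits (least significant first) and the leftover top index, as B's loop produces them
def symsIdx : Nat → Int → List String × Int
  | 0, i => ([], i)
  | n + 1, i =>
      let p := symsIdx n (PySem.Int.floordiv i 4)
      (numberToSymbol (PySem.Int.mod i 4) :: p.1, p.2)

lemma intercalate_nil_flatten (l : List (List Char)) :
    List.intercalate ([] : List Char) l = l.flatten := by
  simp only [List.intercalate]
  induction l with
  | nil => simp
  | cons x t ih =>
    cases t with
    | nil => simp
    | cons y u =>
      rw [List.intersperse_cons₂]
      simp [ih]

lemma join_empty_append_singleton (l : List String) (a : String) :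
    PySem.Str.join "" (l ++ [a]) = PySem.Str.join "" l ++ a := by
  apply String.toList_inj.mp
  simp [PySem.Str.toList_join, PySem.Chars.join, intercalate_nil_flatten]

lemma join_empty_singleton (a : String) : PySem.Str.join "" [a] = a := by
  apply String.toList_inj.mp
  simp [PySem.Str.toList_join, PySem.Chars.join, intercalate_nil_flatten]

lemma foldl_ignore_eq_symsIdx (l : List Int) :
    ∀ (i : Int) (acc : List String),
      l.foldl (fun (st : List String × Int) _ =>
          (st.1 ++ [numberToSymbol (PySem.Int.mod st.2 4)], PySem.Int.floordiv st.2 4)) (acc, i)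
        = (acc ++ (symsIdx l.length i).1, (symsIdx l.length i).2) := by
  induction l with
  | nil => intro i acc; simp [symsIdx]
  | cons x t ih =>
      intro i acc
      rw [List.foldl_cons, ih]
      simp [symsIdx]

lemma A_eq_core (n : Nat) : ∀ i : Int,
    NumberToPattern i ((n : Int) + 1)
      = PySem.Str.join "" ((symsIdx n i).1 ++ [numberToSymbol (symsIdx n i).2]).reverse := by
  induction n with
  | zero =>
      intro i
      rw [NumberToPattern]
      simp [symsIdx, join_empty_singleton]
  | succ m ih =>
      intro i
      rw [NumberToPattern]
      push_cast
      have h1 : ¬ ((m : Int) + 1 + 1 = 1) := by omega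
      have h2 : ¬ ((m : Int) + 1 + 1 < 1) := by omega
      rw [if_neg h1, if_neg h2]
      have h3 : (m : Int) + 1 + 1 - 1 = (m : Int) + 1 := by ring
      rw [h3, ih]
      show _ = PySem.Str.join "" ((symsIdx (m + 1) i).1 ++ [numberToSymbol (symsIdx (m + 1) i).2]).reverse
      simp only [symsIdx]
      rw [List.cons_append, List.reverse_cons, join_empty_append_singleton]

lemma alt_eq_core (i : Int) (k : Int) (hk : 1 ≤ k) :
    NumberToPattern_alt i k
      = PySem.Str.join "" ((symsIdx (k - 1).toNat i).1 ++ [numberToSymbol (symsIdx (k - 1).toNat i).2]).reverse := by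
  unfold NumberToPattern_alt
  by_cases h1 : k = 1
  · subst h1
    simp [symsIdx, join_empty_singleton]
  · rw [if_neg h1]
    have hfold := foldl_ignore_eq_symsIdx (PySem.List.pyRange 0 (k - 1) 1) i []
    have hlen : (PySem.List.pyRange 0 (k - 1) 1).length = (k - 1).toNat := by
      rw [PySem.List.length_pyRange_one]; omega
    rw [hlen] at hfold
    simp only [hfold, List.nil_append]

-- ===== VERDICT (by name: the statement is the Claim_ definition above) =====
theorem NumberToPattern_spec : Claim_equal_NumberToPattern := by
  intro index k _ hpre
  have hk : 1 ≤ k := hpre.1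
  have hn : ((k - 1).toNat : Int) + 1 = k := by omega
  unfold Spec_NumberToPattern
  have hA := A_eq_core (k - 1).toNat index
  rw [hn] at hA
  rw [hA, alt_eq_core index k hk]
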